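-- pv_equiv track=rewrite | github.com/cutehackers/rail | scripts/prepare_changelog.py | read_note_subsections
-- ===== SOURCE A (Python) =====
-- def read_note_subsections(body: str) -> dict[str, str]:
--     sections: dict[str, str] = {}
--     current_title: str | None = None
--     current_lines: list[str] = []
--     for line in body.splitlines():
--         if line.startswith("### "):
--             if current_title is not None:
--                 sections[current_title] = "\n".join(current_lines).strip()
--             current_title = line[4:].strip()
--             current_lines = []
--             continue
--         if current_title is not None:
--             current_lines.append(line)
--     if current_title is not None:
--         sections[current_title] = "\n".join(current_lines).strip()
--     return sections
-- ===== SOURCE B (Python) =====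
-- def read_note_subsections(body: str) -> dict[str, str]:
--     lines = body.splitlines()
--     idxs = [i for i, l in enumerate(lines) if l.startswith("### ")]
--     sections: dict[str, str] = {}
--     for start, end in zip(idxs, idxs[1:] + [len(lines)]):
--         sections[lines[start][4:].strip()] = "\n".join(lines[start + 1:end]).strip()
--     return sections
-- ===== Notes on version B (the rewrite author's own statement) =====
-- stated objective: alternative
-- what changed: Replaces A's incremental state machine (current title + accumulated lines, flushed at each header and at EOF) by a two-pass index computation: collect header positions, then slice each block lines[start+1:end] directly.
import Mathlib
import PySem

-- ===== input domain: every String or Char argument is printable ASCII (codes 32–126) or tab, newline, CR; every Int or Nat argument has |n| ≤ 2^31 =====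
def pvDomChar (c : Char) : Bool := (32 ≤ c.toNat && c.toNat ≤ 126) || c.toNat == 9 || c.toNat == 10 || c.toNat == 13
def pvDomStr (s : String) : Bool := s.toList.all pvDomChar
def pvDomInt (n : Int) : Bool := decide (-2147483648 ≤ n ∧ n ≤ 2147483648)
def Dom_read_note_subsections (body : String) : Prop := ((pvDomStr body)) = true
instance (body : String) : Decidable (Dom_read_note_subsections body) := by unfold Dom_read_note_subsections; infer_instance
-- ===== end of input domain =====

-- B replaces A's incremental state machine with a two-pass header-index + block-slicing decomposition; same result, same cost.


-- ===== PORT A =====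
-- the for-loop of A, state = (sections, current_title, current_lines); the trailing
-- 'if current_title is not None: flush' of A is the [] base case
def loopA : List String → PySem.Dict String String → Option String → List String → PySem.Dict String String
  | [], d, t?, acc =>
      match t? with
      | none => d
      | some t => d.insert t (PySem.Str.strip (PySem.Str.join "\n" acc))
  | l :: ls, d, t?, acc =>
      if PySem.Str.startswith l "### " then
        let d' := match t? with
          | none => d
          | some t => d.insert t (PySem.Str.strip (PySem.Str.join "\n" acc))
        loopA ls d' (some (PySem.Str.strip (PySem.Str.slice l (some 4) none))) []
      else
        match t? with
        | none => loopA ls d none acc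
        | some t => loopA ls d (some t) (acc ++ [l])

def read_note_subsections (body : String) : List (String × String) :=
  (loopA (PySem.Str.splitlines body) PySem.Dict.empty none []).items

-- ===== PORT B =====
def read_note_subsections_alt (body : String) : List (String × String) :=
  let lines := PySem.Str.splitlines body
  let idxs := ((PySem.List.enumerate lines 0).filter (fun p => PySem.Str.startswith p.2 "### ")).map (fun p => p.1)
  ((idxs.zip (idxs.drop 1 ++ [(lines.length : Int)])).foldl (fun d p =>
      d.insert (PySem.Str.strip (PySem.Str.slice ((PySem.List.pyGet? lines p.1).getD "") (some 4) none))
               (PySem.Str.strip (PySem.Str.join "\n" (PySem.List.slice lines (some (p.1 + 1)) (some p.2)))))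
    PySem.Dict.empty).items

-- ===== PRECONDITION & SPEC =====
def Spec_read_note_subsections (body : String) (out : List (String × String)) : Prop := out = read_note_subsections_alt body
instance (body : String) (out : List (String × String)) : Decidable (Spec_read_note_subsections body out) := by unfold Spec_read_note_subsections; infer_instance

-- ===== CLAIM (what is proved, stated in full; the proofs are below) =====
def Claim_equal_read_note_subsections : Prop := ∀ (body : String), Dom_read_note_subsections body → Spec_read_note_subsections body (read_note_subsections body)

-- ===== LEMMAS AND PROOFS =====

def pvHdr (l : String) : Bool := PySem.Str.startswith l "### "

def pvTitle (l : String) : String := PySem.Str.strip (PySem.Str.slice l (some 4) none)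

def pvCont (c : List String) : String := PySem.Str.strip (PySem.Str.join "\n" c)

-- header indices of R, enumerated from offset s (what B's first pass computes)
def pvIdx (R : List String) (s : Int) : List Int :=
  ((PySem.List.enumerate R s).filter (fun p => pvHdr p.2)).map (fun p => p.1)

-- common intermediate form: chop the list into header-led blocks
def pvMid : List String → PySem.Dict String String → PySem.Dict String String
  | [], d => d
  | l :: ls, d =>
      pvMid (ls.dropWhile (fun x => !pvHdr x))
        (d.insert (pvTitle l) (pvCont (ls.takeWhile (fun x => !pvHdr x))))
  termination_by xs _ => xs.length
  decreasing_by
    simp only [List.length_cons]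
    exact Nat.lt_succ_of_le (List.length_dropWhile_le _ _)

-- B's fold step
def pvStep (L : List String) (d : PySem.Dict String String) (p : Int × Int) : PySem.Dict String String :=
  d.insert (pvTitle ((PySem.List.pyGet? L p.1).getD ""))
           (pvCont (PySem.List.slice L (some (p.1 + 1)) (some p.2)))

theorem pvMid_cons (l : String) (ls : List String) (d : PySem.Dict String String) :
    pvMid (l :: ls) d =
      pvMid (ls.dropWhile (fun x => !pvHdr x))
        (d.insert (pvTitle l) (pvCont (ls.takeWhile (fun x => !pvHdr x)))) := by
  rw [pvMid]

theorem pvIdx_nil (s : Int) : pvIdx [] s = [] := rfl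

theorem pvIdx_cons (x : String) (R : List String) (s : Int) :
    pvIdx (x :: R) s = (if pvHdr x then [s] else []) ++ pvIdx R (s + 1) := by
  simp only [pvIdx, PySem.List.enumerate_cons, List.filter_cons]
  by_cases h : pvHdr x <;> simp [h]

theorem pvIdx_append (C R : List String) (s : Int) :
    pvIdx (C ++ R) s = pvIdx C s ++ pvIdx R (s + C.length) := by
  induction C generalizing s with
  | nil => simp [pvIdx_nil]
  | cons c cs ih =>
      simp only [List.cons_append, pvIdx_cons, ih, List.length_cons]
      rw [List.append_assoc]
      congr 2
      push_cast
      ring_nf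

theorem pvIdx_eq_nil_iff (R : List String) (s : Int) :
    pvIdx R s = [] ↔ ∀ x ∈ R, pvHdr x = false := by
  induction R generalizing s with
  | nil => simp [pvIdx_nil]
  | cons x xs ih =>
      rw [pvIdx_cons]
      by_cases h : pvHdr x <;> simp [h, ih]

theorem pvIdx_no_hdr (R : List String) (s : Int) (h : ∀ x ∈ R, pvHdr x = false) :
    pvIdx R s = [] := (pvIdx_eq_nil_iff R s).mpr h

theorem dropWhile_head_hdr {T : List String} {h : String} {rest : List String}
    (e : T.dropWhile (fun x => !pvHdr x) = h :: rest) : pvHdr h = true := by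
  have := List.head_dropWhile_not (fun x => !pvHdr x) (l := T)
  rw [e] at this
  simpa using this (by simp)

-- the slice between one header index and the next header index (or EOF) is the
-- non-header prefix of the suffix
theorem slice_between (T : List String) (n : Nat) (L : List String)
    (hdrop : L.drop n = T) (hlen : L.length = n + T.length) :
    PySem.List.slice L (some (n : Int)) (some ((pvIdx T (n : Int)).headD (L.length : Int)))
      = T.takeWhile (fun x => !pvHdr x) := by
  obtain ⟨C2, hC2⟩ : ∃ C2, List.takeWhile (fun x => !pvHdr x) T = C2 := ⟨_, rfl⟩
  have hCD : C2 ++ T.dropWhile (fun x => !pvHdr x) = T := by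
    rw [← hC2]; exact List.takeWhile_append_dropWhile
  have hCnh : ∀ x ∈ C2, pvHdr x = false := by
    intro x hx
    have := List.mem_takeWhile_imp (hC2 ▸ hx)
    simpa using this
  rw [hC2]
  cases hDe : T.dropWhile (fun x => !pvHdr x) with
  | nil =>
      have hTW : C2 = T := by rw [hDe, List.append_nil] at hCD; exact hCD
      have hIdx : pvIdx T (n : Int) = [] :=
        pvIdx_no_hdr T _ (fun x hx => hCnh x (hTW ▸ hx))
      rw [hIdx]
      simp only [List.headD_nil]
      rw [show ((L.length : Int)) = ((L.length : Nat) : Int) by rfl,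
        PySem.List.slice_natCast, hdrop, hTW]
      exact List.take_of_length_le (by omega)
  | cons h2 T2 =>
      have hhdr2 : pvHdr h2 = true := dropWhile_head_hdr hDe
      have hTCT : T = C2 ++ h2 :: T2 := by rw [← hCD, hDe]
      have hIdx : pvIdx T (n : Int) = ((n : Int) + C2.length) :: pvIdx T2 ((n : Int) + C2.length + 1) := by
        conv_lhs => rw [hTCT]
        rw [pvIdx_append, pvIdx_no_hdr C2 _ hCnh, List.nil_append, pvIdx_cons, hhdr2]
        simp
      rw [hIdx, List.headD_cons]
      rw [show ((n : Int) + C2.length) = ((n + C2.length : Nat) : Int) by push_cast; ring,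
        PySem.List.slice_natCast, hdrop]
      rw [show n + C2.length - n = C2.length by omega]
      conv_lhs => rw [hTCT]
      exact List.take_left

-- zip of a header-index list against its shifted self, unfolded one step
theorem zip_bounds_cons (a : Int) (hs : List Int) (e : Int) :
    (a :: hs).zip ((a :: hs).drop 1 ++ [e]) =
      (a, hs.headD e) :: hs.zip (hs.drop 1 ++ [e]) := by
  cases hs <;> simp [List.zip_cons_cons]

-- the main B-side lemma: the fold over absolute header indices equals pvMid on the suffix
theorem keyB (m : Nat) : ∀ (R : List String) (n : Nat) (L : List String)
    (d : PySem.Dict String String), R.length ≤ m → L.drop n = R →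
    (((pvIdx R n).zip ((pvIdx R n).drop 1 ++ [(L.length : Int)])).foldl (pvStep L) d)
      = pvMid (R.dropWhile (fun x => !pvHdr x)) d := by
  induction m with
  | zero =>
      intro R n L d hm hdrop
      have : R = [] := List.length_eq_zero_iff.mp (Nat.le_zero.mp hm)
      subst this
      simp [pvIdx_nil, pvMid]
  | succ m ih =>
      intro R n L d hm hdrop
      obtain ⟨C, hC⟩ : ∃ C, List.takeWhile (fun x => !pvHdr x) R = C := ⟨_, rfl⟩
      have hCD : C ++ R.dropWhile (fun x => !pvHdr x) = R := by
        rw [← hC]; exact List.takeWhile_append_dropWhile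
      have hCnh : ∀ x ∈ C, pvHdr x = false := by
        intro x hx
        have := List.mem_takeWhile_imp (hC ▸ hx)
        simpa using this
      cases hDe : R.dropWhile (fun x => !pvHdr x) with
      | nil =>
          have hTW : C = R := by rw [hDe, List.append_nil] at hCD; exact hCD
          have hIdx : pvIdx R (n : Int) = [] :=
            pvIdx_no_hdr R _ (fun x hx => hCnh x (hTW ▸ hx))
          rw [hIdx]
          simp [pvMid]
      | cons h T =>
          have hhdr : pvHdr h = true := dropWhile_head_hdr hDe
          have hRCT : R = C ++ h :: T := by rw [← hCD, hDe]
          have hIdxR : pvIdx R (n : Int) =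
              ((n : Int) + C.length) :: pvIdx T ((n : Int) + C.length + 1) := by
            conv_lhs => rw [hRCT]
            rw [pvIdx_append, pvIdx_no_hdr C _ hCnh, List.nil_append, pvIdx_cons, hhdr]
            simp
          have hnle : n ≤ L.length := by
            by_contra hcon
            have hnil : L.drop n = [] := List.drop_eq_nil_of_le (by omega)
            rw [hdrop] at hnil
            rw [hnil] at hRCT
            exact absurd hRCT (by simp)
          have hlenL : L.length = n + R.length := by
            have h3 := List.length_drop (l := L) (i := n)
            rw [hdrop] at h3
            omega
          have hdropCh : L.drop n = (C ++ [h]) ++ T := by rw [hdrop, hRCT]; simp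
          have hdropT : L.drop (n + C.length + 1) = T := by
            have h5 : List.drop (C ++ [h]).length ((C ++ [h]) ++ T) = T := List.drop_left
            rw [← hdropCh, List.drop_drop] at h5
            rw [show n + (C ++ [h]).length = n + C.length + 1 by simp; omega] at h5
            exact h5
          have hRlen : R.length = C.length + 1 + T.length := by
            rw [hRCT]; simp; omega
          have hget : (PySem.List.pyGet? L ((n : Int) + C.length)).getD "" = h := by
            rw [show ((n : Int) + C.length) = ((n + C.length : Nat) : Int) by push_cast; ring,
              PySem.List.pyGet?_natCast]
            have h8 : L.drop (n + C.length) = h :: T := by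
              have h9 : List.drop C.length (C ++ h :: T) = h :: T := by
                have := List.drop_left (l₁ := C) (l₂ := h :: T)
                exact this
              rw [← hdrop] at hRCT
              rw [← hRCT, List.drop_drop] at h9
              
              exact h9
            have h6 : L[n + C.length]? = some h := by
              have h7 : (L.drop (n + C.length))[0]? = L[n + C.length + 0]? := List.getElem?_drop
              rw [h8] at h7
              simpa using h7.symm
            rw [h6]
            rfl
          have hslice : PySem.List.slice L (some ((n : Int) + C.length + 1))
              (some ((pvIdx T ((n : Int) + C.length + 1)).headD (L.length : Int)))
                = T.takeWhile (fun x => !pvHdr x) := by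
            have := slice_between T (n + C.length + 1) L hdropT (by omega)
            rw [show ((n + C.length + 1 : Nat) : Int) = ((n : Int) + C.length + 1) by push_cast; ring] at this
            exact this
          rw [hIdxR, zip_bounds_cons, List.foldl_cons]
          have hstep : pvStep L d ((n : Int) + C.length,
              (pvIdx T ((n : Int) + C.length + 1)).headD (L.length : Int))
                = d.insert (pvTitle h) (pvCont (T.takeWhile (fun x => !pvHdr x))) := by
            unfold pvStep
            rw [hget]
            rw [hslice]
          have hihT := ih T (n + C.length + 1) L
            (d.insert (pvTitle h) (pvCont (T.takeWhile (fun x => !pvHdr x))))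
            (by omega) hdropT
          rw [show ((n + C.length + 1 : Nat) : Int) = ((n : Int) + C.length + 1) by push_cast; ring] at hihT
          rw [hstep, hihT, pvMid_cons]

-- A-side: the state machine equals pvMid, with an open section being accumulated
theorem loopA_some (L : List String) : ∀ (d : PySem.Dict String String) (t : String)
    (acc : List String),
    loopA L d (some t) acc =
      pvMid (L.dropWhile (fun x => !pvHdr x))
        (d.insert t (pvCont (acc ++ L.takeWhile (fun x => !pvHdr x)))) := by
  induction L with
  | nil => intro d t acc; simp [loopA, pvMid, pvCont]
  | cons l ls ih =>
      intro d t acc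
      by_cases hl : pvHdr l
      · have hl' : PySem.Str.startswith l "### " = true := hl
        have e1 : List.dropWhile (fun x => !pvHdr x) (l :: ls) = l :: ls := by
          simp [hl]
        have e2 : List.takeWhile (fun x => !pvHdr x) (l :: ls) = [] := by
          simp [hl]
        rw [e1, e2, List.append_nil, pvMid_cons, loopA, if_pos hl', ih, List.nil_append]
        rfl
      · have hl' : ¬ (PySem.Str.startswith l "### " = true) := hl
        have e1 : List.dropWhile (fun x => !pvHdr x) (l :: ls) =
            List.dropWhile (fun x => !pvHdr x) ls := by
          simp [hl]
        have e2 : List.takeWhile (fun x => !pvHdr x) (l :: ls) =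
            l :: List.takeWhile (fun x => !pvHdr x) ls := by
          simp [hl]
        rw [loopA, if_neg hl', ih, e1, e2]
        simp

theorem loopA_none (L : List String) : ∀ (d : PySem.Dict String String) (acc : List String),
    loopA L d none acc = pvMid (L.dropWhile (fun x => !pvHdr x)) d := by
  induction L with
  | nil => intro d acc; simp [loopA, pvMid]
  | cons l ls ih =>
      intro d acc
      by_cases hl : pvHdr l
      · have hl' : PySem.Str.startswith l "### " = true := hl
        have e1 : List.dropWhile (fun x => !pvHdr x) (l :: ls) = l :: ls := by
          simp [hl]
        rw [e1, pvMid_cons, loopA, if_pos hl', loopA_some, List.nil_append]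
        rfl
      · have hl' : ¬ (PySem.Str.startswith l "### " = true) := hl
        have e1 : List.dropWhile (fun x => !pvHdr x) (l :: ls) =
            List.dropWhile (fun x => !pvHdr x) ls := by
          simp [hl]
        rw [loopA, if_neg hl', ih, e1]

-- ===== VERDICT (by name: the statement is the Claim_ definition above) =====
theorem read_note_subsections_spec : Claim_equal_read_note_subsections := by
  intro body _
  unfold Spec_read_note_subsections read_note_subsections read_note_subsections_alt
  rw [loopA_none]
  have h0 : (PySem.Str.splitlines body).drop 0 = PySem.Str.splitlines body := rfl
  have := keyB (PySem.Str.splitlines body).length (PySem.Str.splitlines body) 0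
    (PySem.Str.splitlines body) PySem.Dict.empty (le_refl _) h0
  simp only [Nat.cast_zero] at this
  exact congrArg PySem.Dict.items this.symm
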